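-- pv_equiv track=rewrite | github.com/2takumax/ufc-fight-prediction | src/scraper/events.py | organise_fight_stats
-- ===== SOURCE A (Python) =====
-- from typing import List, Dict, Any, Optional, Tuple
--
-- def organise_fight_stats(stats_from_soup: List[str]) -> List[List[str]]:
--     """統計を整理"""
--     fighter_stats_clean = []
--
--     if not stats_from_soup:
--         return fighter_stats_clean
--
--     # ファイター名で統計をグループ化
--     fighter_name = stats_from_soup[0] if stats_from_soup else ''
--     current_group = []
--
--     for stat in stats_from_soup:
--         if stat == fighter_name and current_group:
--             fighter_stats_clean.append(current_group)
--             current_group = [stat]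
--         else:
--             current_group.append(stat)
--
--     if current_group:
--         fighter_stats_clean.append(current_group)
--
--     return fighter_stats_clean
-- ===== SOURCE B (Python) =====
-- def organise_fight_stats(stats_from_soup):
--     """Group stats into name-led sublists: find each next occurrence of the
--     fighter name and slice the group out, instead of a streaming accumulator."""
--     if not stats_from_soup:
--         return []
--     name = stats_from_soup[0]
--     groups = []
--     n = len(stats_from_soup)
--     i = 0
--     while i < n:
--         j = i + 1
--         while j < n and stats_from_soup[j] != name:
--             j += 1
--         groups.append(stats_from_soup[i:j])
--         i = j
--     return groups
-- ===== Notes on version B (the rewrite author's own statement) =====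
-- stated objective: alternative
-- what changed: Replaces the streaming accumulator with flush-on-boundary by an outer loop that scans ahead to the next occurrence of the fighter name and slices each group out directly.
import Mathlib
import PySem

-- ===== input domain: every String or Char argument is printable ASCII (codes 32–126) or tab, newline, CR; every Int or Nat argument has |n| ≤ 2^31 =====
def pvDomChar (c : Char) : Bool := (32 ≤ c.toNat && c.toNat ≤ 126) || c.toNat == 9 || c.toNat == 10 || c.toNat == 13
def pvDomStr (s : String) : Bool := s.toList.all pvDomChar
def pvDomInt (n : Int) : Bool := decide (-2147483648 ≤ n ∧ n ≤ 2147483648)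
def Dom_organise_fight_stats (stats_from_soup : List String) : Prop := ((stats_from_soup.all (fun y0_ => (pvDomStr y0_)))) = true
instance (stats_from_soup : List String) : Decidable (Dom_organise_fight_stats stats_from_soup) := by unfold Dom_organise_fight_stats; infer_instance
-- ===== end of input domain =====

-- ===== PORT A =====
-- A's loop: clean/current accumulator, flush when stat == fighter_name and current nonempty
def ofsLoop (name : String) (clean : List (List String)) (cur : List String) : List String → List (List String)
  | [] => if cur ≠ [] then clean ++ [cur] else clean
  | s :: rest =>
      if s = name ∧ cur ≠ [] then ofsLoop name (clean ++ [cur]) [s] rest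
      else ofsLoop name clean (cur ++ [s]) rest

def organise_fight_stats (stats_from_soup : List String) : List (List String) :=
  match stats_from_soup with
  | [] => []
  | name :: _ => ofsLoop name [] [] stats_from_soup

-- ===== PORT B =====
-- B: per group, scan ahead to the next occurrence of name (takeWhile/dropWhile = the inner scan), slice it out
def ofsSplit (name : String) : List String → List (List String)
  | [] => []
  | x :: rest =>
      (x :: rest.takeWhile (· != name)) :: ofsSplit name (rest.dropWhile (· != name))
termination_by xs => xs.length
decreasing_by
  simpa using Nat.lt_succ_of_le (List.length_dropWhile_le _ _)

def organise_fight_stats_alt (stats_from_soup : List String) : List (List String) :=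
  match stats_from_soup with
  | [] => []
  | name :: _ => ofsSplit name stats_from_soup

-- ===== PRECONDITION & SPEC =====
def Spec_organise_fight_stats (stats_from_soup : List String) (out : List (List String)) : Prop := out = organise_fight_stats_alt stats_from_soup
instance (stats_from_soup : List String) (out : List (List String)) : Decidable (Spec_organise_fight_stats stats_from_soup out) := by unfold Spec_organise_fight_stats; infer_instance

-- ===== CLAIM (what is proved, stated in full; the proofs are below) =====
def Claim_equal_organise_fight_stats : Prop := ∀ (stats_from_soup : List String), Dom_organise_fight_stats stats_from_soup → Spec_organise_fight_stats stats_from_soup (organise_fight_stats stats_from_soup)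

-- ===== LEMMAS AND PROOFS =====
lemma ofsLoop_eq_split (name : String) (xs : List String) :
    ∀ (clean : List (List String)) (cur : List String), cur ≠ [] →
    ofsLoop name clean cur xs =
      clean ++ (cur ++ xs.takeWhile (· != name)) :: ofsSplit name (xs.dropWhile (· != name)) := by
  induction xs with
  | nil => intro clean cur h; simp [ofsLoop, ofsSplit, h]
  | cons s rest ih =>
    intro clean cur h
    by_cases hs : s = name
    · subst hs
      simp only [ofsLoop]
      rw [if_pos (⟨trivial, h⟩ : True ∧ cur ≠ []), ih (clean ++ [cur]) [s] (by simp)]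
      simp [ofsSplit, List.takeWhile, List.dropWhile]
    · have hb : (s != name) = true := by simpa using hs
      simp only [ofsLoop, List.takeWhile, List.dropWhile, hb, hs, false_and, if_false]
      rw [ih clean (cur ++ [s]) (by simp)]
      simp

-- ===== VERDICT (by name: the statement is the Claim_ definition above) =====
theorem organise_fight_stats_spec : Claim_equal_organise_fight_stats := by
  intro xs _
  unfold Spec_organise_fight_stats
  match xs with
  | [] => rfl
  | name :: rest =>
    show ofsLoop name [] [] (name :: rest) = ofsSplit name (name :: rest)
    rw [show ofsLoop name [] [] (name :: rest) = ofsLoop name [] [name] rest by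
      simp [ofsLoop]]
    rw [ofsLoop_eq_split name rest [] [name] (by simp)]
    simp [ofsSplit]
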